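-- pv_equiv track=rewrite | github.com/akshayrw25/Rough-Work | applog-pattern-exploration/compare_stacktraces.py | build_node_chain
-- ===== SOURCE A (Python) =====
-- def extract_frames(stacktrace: str):
--     frames = []
--     for line in stacktrace.splitlines():
--         line = line.strip()
--         if line.startswith("at "):
--             frames.append(line)
--     return frames
--
-- def extract_prefix(frame_line: str):
--     """
--     Given: 'at reactor.core.publisher.FluxMapFuseable$MapFuseableSubscriber.onNext(FluxMapFuseable.java:129)'
--     Return: 'reactor.core.publisher.FluxMapFuseable'
--     """
--     line = frame_line[3:]  # remove 'at '
--     class_and_method = line.split("(")[0]  # remove "(File.java:x)"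
--
--     # Split into className and method
--     if "." not in class_and_method:
--         return class_and_method
--
--     idx = class_and_method.rfind(".")
--     full_class = class_and_method[:idx]
--
--     # If class contains $, keep prefix before $
--     if "$" in full_class:
--         return full_class.split("$")[0]
--
--     return full_class
--
-- def build_node_chain(stacktrace: str):
--     frames = extract_frames(stacktrace)
--
--     # Process from bottom to top
--     frames = frames[::-1]
--
--     nodes = []
--     last_prefix = None
--     count = 0
--
--     for f in frames:
--         prefix = extract_prefix(f)
--
--         if prefix == last_prefix:
--             count += 1
--         else:
--             if last_prefix is not None:
--                 nodes.append((last_prefix, count))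
--             last_prefix = prefix
--             count = 1
--
--     # Add last node
--     if last_prefix is not None:
--         nodes.append((last_prefix, count))
--
--     return nodes
-- ===== SOURCE B (Python) =====
-- def extract_prefix(frame_line: str):
--     line = frame_line[3:]
--     class_and_method = line.split("(")[0]
--     if "." not in class_and_method:
--         return class_and_method
--     idx = class_and_method.rfind(".")
--     full_class = class_and_method[:idx]
--     if "$" in full_class:
--         return full_class.split("$")[0]
--     return full_class
--
-- def build_node_chain(stacktrace: str):
--     # Single forward pass, no frame list, no reversal, no last/count state:
--     # each frame's run is merged into the FRONT of the output (the head is the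
--     # run of the most recently seen, i.e. topmost-so-far, frame prefix).
--     nodes = []
--     for line in stacktrace.splitlines():
--         line = line.strip()
--         if line.startswith("at "):
--             prefix = extract_prefix(line)
--             if nodes and nodes[0][0] == prefix:
--                 nodes[0] = (prefix, nodes[0][1] + 1)
--             else:
--                 nodes.insert(0, (prefix, 1))
--     return nodes
-- ===== Notes on version B (the rewrite author's own statement) =====
-- stated objective: simpler
-- what changed: B does one forward pass over the lines with no frame list, no reversal and no last_prefix/count state machine: each frame's prefix is merged into the FRONT of the output list (increment the head run or push a new one), so the bottom-up order falls out without reversing and without a post-loop flush.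
import Mathlib
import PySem

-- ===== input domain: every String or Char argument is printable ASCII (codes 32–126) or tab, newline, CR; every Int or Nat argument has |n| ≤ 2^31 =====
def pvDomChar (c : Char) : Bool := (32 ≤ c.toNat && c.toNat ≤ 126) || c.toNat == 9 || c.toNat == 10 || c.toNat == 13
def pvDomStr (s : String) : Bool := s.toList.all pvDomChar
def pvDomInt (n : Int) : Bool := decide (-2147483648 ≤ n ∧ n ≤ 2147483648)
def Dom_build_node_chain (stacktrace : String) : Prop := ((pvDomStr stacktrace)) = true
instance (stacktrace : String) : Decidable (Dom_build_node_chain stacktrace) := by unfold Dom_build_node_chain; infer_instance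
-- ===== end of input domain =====

-- B makes one forward pass merging each frame's prefix into the front of the output,
-- replacing A's extract-reverse-RLE pipeline (objective: simpler, same result).

-- ===== PORT A =====
def extract_frames (stacktrace : String) : List String :=
  (PySem.Str.splitlines stacktrace).foldl
    (fun frames line =>
      let line := PySem.Str.strip line
      if PySem.Str.startswith line "at " then frames ++ [line] else frames) []

-- shared helper (identical in Source A and Source B)
def extract_prefix (frame_line : String) : String :=
  let line := PySem.Str.slice frame_line (some 3) none
  let class_and_method := ((PySem.Str.split? line "(").getD []).headD ""
  if PySem.Str.isIn "." class_and_method = false then class_and_method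
  else
    let idx := PySem.Str.rfind class_and_method "."
    let full_class := PySem.Str.slice class_and_method none (some idx)
    if PySem.Str.isIn "$" full_class then
      ((PySem.Str.split? full_class "$").getD []).headD ""
    else full_class

-- A's loop: nodes / last_prefix / count accumulator, with the post-loop flush
def chainLoop : List String → List (String × Int) → Option String → Int → List (String × Int)
  | [], nodes, last, count =>
      (match last with
       | none => nodes
       | some p => nodes ++ [(p, count)])
  | f :: rest, nodes, last, count =>
      let pfx := extract_prefix f
      if last = some pfx then chainLoop rest nodes last (count + 1)
      else
        match last with
        | none => chainLoop rest nodes (some pfx) 1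
        | some p => chainLoop rest (nodes ++ [(p, count)]) (some pfx) 1

def build_node_chain (stacktrace : String) : List (String × Int) :=
  chainLoop (extract_frames stacktrace).reverse [] none 0

-- ===== PORT B =====
-- Source B's merge of a prefix into the front of the nodes list
def mergeFront (nodes : List (String × Int)) (prefix_ : String) : List (String × Int) :=
  match nodes with
  | (p, c) :: rest =>
      if p = prefix_ then (prefix_, c + 1) :: rest
      else (prefix_, 1) :: (p, c) :: rest
  | [] => [(prefix_, 1)]

def build_node_chain_alt (stacktrace : String) : List (String × Int) :=
  (PySem.Str.splitlines stacktrace).foldl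
    (fun nodes line =>
      let line := PySem.Str.strip line
      if PySem.Str.startswith line "at " then
        mergeFront nodes (extract_prefix line)
      else nodes) []

-- ===== PRECONDITION & SPEC =====
def Spec_build_node_chain (stacktrace : String) (out : List (String × Int)) : Prop := out = build_node_chain_alt stacktrace
instance (stacktrace : String) (out : List (String × Int)) : Decidable (Spec_build_node_chain stacktrace out) := by unfold Spec_build_node_chain; infer_instance

-- ===== CLAIM (what is proved, stated in full; the proofs are below) =====
def Claim_equal_build_node_chain : Prop := ∀ (stacktrace : String), Dom_build_node_chain stacktrace → Spec_build_node_chain stacktrace (build_node_chain stacktrace)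

-- ===== LEMMAS AND PROOFS =====

-- canonical run-length encoding, used to relate both sides
def runLength : List String → List (String × Int)
  | [] => []
  | p :: rest =>
      (p, 1 + ((rest.takeWhile (fun q => q = p)).length : Int)) ::
        runLength (rest.dropWhile (fun q => q = p))
termination_by xs => xs.length
decreasing_by
  simp only [List.length_cons]
  exact Nat.lt_succ_of_le (List.length_dropWhile_le _ _)

-- line filter shared by both ports
def frameOf (line : String) : Option String :=
  let l := PySem.Str.strip line
  if PySem.Str.startswith l "at " then some l else none

lemma frameOf_pos (l : String) (h : PySem.Str.startswith (PySem.Str.strip l) "at " = true) :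
    frameOf l = some (PySem.Str.strip l) := by
  simp only [frameOf]
  rw [if_pos h]

lemma frameOf_neg (l : String) (h : ¬ PySem.Str.startswith (PySem.Str.strip l) "at " = true) :
    frameOf l = none := by
  simp only [frameOf]
  rw [if_neg h]

-- ----- A side: A = runLength of the reversed prefix list -----

def pureLoop : List String → Option String → Int → List (String × Int)
  | [], none, _ => []
  | [], some p, count => [(p, count)]
  | x :: xs, none, _ => pureLoop xs (some x) 1
  | x :: xs, some p, count =>
      if p = x then pureLoop xs (some p) (count + 1)
      else (p, count) :: pureLoop xs (some x) 1

lemma chainLoop_eq_pureLoop (frames : List String) (nodes : List (String × Int))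
    (last : Option String) (count : Int) :
    chainLoop frames nodes last count =
      nodes ++ pureLoop (frames.map extract_prefix) last count := by
  induction frames generalizing nodes last count with
  | nil => cases last <;> simp [chainLoop, pureLoop]
  | cons f rest ih =>
      simp only [chainLoop, List.map_cons]
      cases last with
      | none => simp [pureLoop, ih]
      | some p =>
          by_cases h : p = extract_prefix f
          · simp [h, pureLoop, ih]
          · have h' : ¬ (some p = some (extract_prefix f)) := by simp [h]
            simp [h, h', pureLoop, ih]

lemma pureLoop_some_eq (xs : List String) (p : String) (count : Int) :
    pureLoop xs (some p) count =
      (p, count + ((xs.takeWhile (fun q => q = p)).length : Int)) ::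
        runLength (xs.dropWhile (fun q => q = p)) := by
  induction xs generalizing p count with
  | nil => simp [pureLoop, runLength]
  | cons x xs ih =>
      by_cases h : p = x
      · subst h
        simp only [pureLoop, List.takeWhile_cons, List.dropWhile_cons, ih]
        simp [List.length_cons]
        ring_nf
      · have hx : (decide (x = p)) = false := decide_eq_false (fun hxp => h hxp.symm)
        simp only [pureLoop, if_neg h, List.takeWhile_cons, List.dropWhile_cons, hx]
        simp [runLength, ih]

lemma pureLoop_none_eq_runLength (xs : List String) :
    pureLoop xs none 0 = runLength xs := by
  cases xs with
  | nil => simp [pureLoop, runLength]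
  | cons x xs =>
      rw [pureLoop, pureLoop_some_eq]
      simp [runLength]

lemma extract_frames_eq (lines : List String) (acc : List String) :
    lines.foldl
      (fun frames line =>
        let line := PySem.Str.strip line
        if PySem.Str.startswith line "at " then frames ++ [line] else frames) acc
      = acc ++ lines.filterMap frameOf := by
  induction lines generalizing acc with
  | nil => simp
  | cons l ls ih =>
      by_cases h : PySem.Str.startswith (PySem.Str.strip l) "at " = true
      · simp only [List.foldl_cons, List.filterMap_cons, frameOf_pos l h]
        rw [if_pos h, ih]
        simp
      · simp only [List.foldl_cons, List.filterMap_cons, frameOf_neg l h]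
        rw [if_neg h, ih]

-- ----- B side: B = runLength of the reversed prefix list too -----

lemma runLength_cons (p : String) (rest : List String) :
    runLength (p :: rest) =
      (p, 1 + ((rest.takeWhile (fun q => q = p)).length : Int)) ::
        runLength (rest.dropWhile (fun q => q = p)) := by
  rw [runLength]

lemma mergeFront_runLength (l : List String) (x : String) :
    mergeFront (runLength l) x = runLength (x :: l) := by
  cases l with
  | nil => simp [runLength, mergeFront]
  | cons y l' =>
      rw [runLength_cons]
      by_cases h : y = x
      · subst h
        rw [mergeFront, runLength_cons]
        have h1 : (List.takeWhile (fun q => q = y) (y :: l')) = y :: l'.takeWhile (fun q => q = y) := by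
          simp
        have h2 : (List.dropWhile (fun q => q = y) (y :: l')) = l'.dropWhile (fun q => q = y) := by
          simp
        rw [h1, h2]
        simp
        ring_nf
      · have hy : (decide (y = x)) = false := decide_eq_false h
        rw [mergeFront, if_neg (fun hxy : y = x => h hxy), runLength_cons]
        simp [hy, runLength_cons]

lemma foldl_mergeFront_eq (xs l : List String) :
    xs.foldl mergeFront (runLength l) = runLength (xs.reverse ++ l) := by
  induction xs generalizing l with
  | nil => simp
  | cons x xs ih =>
      simp only [List.foldl_cons, List.reverse_cons, List.append_assoc]
      rw [mergeFront_runLength, ih]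
      simp

lemma alt_fold_eq (lines : List String) (nodes : List (String × Int)) :
    lines.foldl
      (fun nodes line =>
        let line := PySem.Str.strip line
        if PySem.Str.startswith line "at " then
          mergeFront nodes (extract_prefix line)
        else nodes) nodes
      = ((lines.filterMap frameOf).map extract_prefix).foldl mergeFront nodes := by
  induction lines generalizing nodes with
  | nil => simp
  | cons l ls ih =>
      by_cases h : PySem.Str.startswith (PySem.Str.strip l) "at " = true
      · simp only [List.foldl_cons, List.filterMap_cons, frameOf_pos l h]
        rw [if_pos h, ih]
        simp
      · simp only [List.foldl_cons, List.filterMap_cons, frameOf_neg l h]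
        rw [if_neg h, ih]

-- ===== VERDICT (by name: the statement is the Claim_ definition above) =====
theorem build_node_chain_spec : Claim_equal_build_node_chain := by
  intro s _
  unfold Spec_build_node_chain build_node_chain build_node_chain_alt extract_frames
  rw [chainLoop_eq_pureLoop, pureLoop_none_eq_runLength, extract_frames_eq, alt_fold_eq]
  have := foldl_mergeFront_eq
    (((PySem.Str.splitlines s).filterMap frameOf).map extract_prefix) []
  simp only [runLength] at this
  rw [this]
  simp [List.map_reverse]
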